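-- pv_equiv track=rewrite | github.com/EcoFriendlyAppleSu/algo | level01/과일_장수.py | solution
-- ===== SOURCE A (Python) =====
-- def solution(k, m, score):
--     answer = 0
--     amountOfBox = len(score) // m
--
--     if len(score) < m:
--         return 0
--
--     score.sort()
--     for i in range(len(score), 0, -m):
--         temp = score[i - m: i]
--         if len(temp) < m:
--             break
--         answer += min(temp) * m
--     return answer
-- ===== SOURCE B (Python) =====
-- def solution(k, m, score):
--     nbox = len(score) // m  # ZeroDivisionError when m == 0, as in A
--     if m < 0 or nbox == 0:
--         return 0
--     freq = {}
--     for s in score: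
--         freq[s] = freq.get(s, 0) + 1
--     answer = 0
--     seen = 0
--     for g in sorted(freq, reverse=True):
--         seen2 = seen + freq[g]
--         answer += (seen2 // m - seen // m) * g * m
--         seen = seen2
--     return answer
-- ===== Notes on version B (the rewrite author's own statement) =====
-- stated objective: alternative
-- what changed: A sorts the whole list and then slices each top group of m taking its min; B never sorts the list: it builds a frequency table, walks the distinct values in descending order keeping a cumulative count, and uses floor-division arithmetic (seen2//m - seen//m) to tell how many box minima fall inside each value's run. A mutates score in place (sort); B does not mutate score (return values agree).
-- outside the precondition, e.g. on solution(2, 0, [1, 2, 3]): A raises ZeroDivisionError, B raises ZeroDivisionError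
import Mathlib
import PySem

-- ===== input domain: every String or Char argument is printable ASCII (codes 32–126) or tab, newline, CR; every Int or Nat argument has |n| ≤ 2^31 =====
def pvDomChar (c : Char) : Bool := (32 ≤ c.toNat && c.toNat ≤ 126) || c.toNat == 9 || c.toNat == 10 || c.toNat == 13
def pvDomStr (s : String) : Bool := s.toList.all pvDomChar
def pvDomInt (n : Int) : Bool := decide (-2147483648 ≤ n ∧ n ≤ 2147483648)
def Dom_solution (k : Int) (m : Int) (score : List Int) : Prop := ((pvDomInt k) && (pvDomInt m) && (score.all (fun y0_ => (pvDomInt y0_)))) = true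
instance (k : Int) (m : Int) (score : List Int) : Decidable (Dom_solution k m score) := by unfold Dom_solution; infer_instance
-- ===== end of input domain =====

-- B replaces A's sort-then-slice-each-box-and-min scan with a frequency table walked over the
-- distinct values in descending order, counting box boundaries by floor-division arithmetic
-- (alternative algorithm).  A sorts `score` in place in Python, B does not mutate `score`:
-- the equivalence proved here is about the RETURN value.

-- ===== PORT A =====
-- the for-loop with `break`: recursion over the range list carrying `answer`
def solutionLoop (s : List Int) (m : Int) : List Int → Int → Int
  | [], answer => answer
  | i :: rest, answer =>
    let temp := PySem.List.slice s (some (i - m)) (some i)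
    if (temp.length : Int) < m then answer
    else solutionLoop s m rest (answer + (PySem.List.min? temp (fun y => y)).getD 0 * m)

def solution (k : Int) (m : Int) (score : List Int) : Int :=
  let n : Int := score.length
  let _amountOfBox := PySem.Int.floordiv n m   -- raises ZeroDivisionError when m = 0: Pre_ excludes m = 0
  if n < m then 0
  else
    let s := PySem.List.sorted score (fun y => y) false
    solutionLoop s m (PySem.List.pyRange n 0 (-m)) 0

-- ===== PORT B =====
def solution_alt (k : Int) (m : Int) (score : List Int) : Int :=
  let n : Int := score.length
  let nbox := PySem.Int.floordiv n m           -- raises ZeroDivisionError when m = 0: Pre_ excludes m = 0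
  if m < 0 ∨ nbox = 0 then 0
  else
    let freq := score.foldl (fun d x => PySem.Dict.insert d x (PySem.Dict.getD d x 0 + 1)) PySem.Dict.empty
    let st := (PySem.List.sorted (PySem.Dict.keys freq) (fun y => y) true).foldl
      (fun (p : Int × Int) g =>
        let seen2 := p.2 + PySem.Dict.getD freq g 0
        (p.1 + (PySem.Int.floordiv seen2 m - PySem.Int.floordiv p.2 m) * g * m, seen2)) (0, 0)
    st.1

-- ===== PRECONDITION & SPEC =====
-- Both A and B raise ZeroDivisionError when m = 0 (len(score) // m); Pre_ excludes exactly that.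
def Pre_solution (k : Int) (m : Int) (score : List Int) : Prop := m ≠ 0
instance (k : Int) (m : Int) (score : List Int) : Decidable (Pre_solution k m score) := by unfold Pre_solution; infer_instance
def pvWitness_solution : Int × Int × List Int := (4, 3, [1, 2, 3, 1, 2, 3, 1])

def Spec_solution (k : Int) (m : Int) (score : List Int) (out : Int) : Prop := out = solution_alt k m score
instance (k : Int) (m : Int) (score : List Int) (out : Int) : Decidable (Spec_solution k m score out) := by unfold Spec_solution; infer_instance

-- ===== CLAIM (what is proved, stated in full; the proofs are below) =====
def Claim_equal_solution : Prop := ∀ (k : Int) (m : Int) (score : List Int), Dom_solution k m score → Pre_solution k m score → Spec_solution k m score (solution k m score)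

-- ===== LEMMAS AND PROOFS =====

-- sum of the box minima s[r], s[m+r], …, s[m*(c-1)+r] of the ascending list (proof-side abbreviation)
def gsum (s : List Int) (m r : Int) : Nat → Int
  | 0 => 0
  | c + 1 => gsum s m r c + PySem.List.pyGetD s (m * c + r) 0

-- sum of the boundary elements D[1*M-1], …, D[t*M-1] of the descending list (proof-side abbreviation)
def hsum (D : List Int) (M : Nat) : Nat → Int
  | 0 => 0
  | t + 1 => hsum D M t + PySem.List.pyGetD D (((t : Int) + 1) * (M : Int) - 1) 0

-- the concatenation of the runs of each distinct value (proof-side abbreviation)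
def blocks (cnt : Int → Nat) : List Int → List Int
  | [] => []
  | g :: K => List.replicate (cnt g) g ++ blocks cnt K

theorem foldl_min_of_le (x : Int) (t : List Int) (h : ∀ y ∈ t, x ≤ y) :
    t.foldl min x = x := by
  induction t with
  | nil => rfl
  | cons y t ih =>
    have hx : min x y = x := min_eq_left (h y (by simp))
    simpa [hx] using ih (fun z hz => h z (by simp [hz]))

theorem min?_of_pairwise (l : List Int) (hne : l ≠ []) (hp : l.Pairwise (· ≤ ·)) :
    PySem.List.min? l (fun y => y) = l.head? := by
  cases l with
  | nil => cases hne rfl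
  | cons x t =>
    rw [PySem.List.min?_id_cons]
    have hx : ∀ y ∈ t, x ≤ y := (List.pairwise_cons.mp hp).1
    simp [foldl_min_of_le x t hx]

theorem pyRange_negm_nil (m i : Int) (hm : 0 < m) (hi : i ≤ 0) :
    PySem.List.pyRange i 0 (-m) = [] := by
  unfold PySem.List.pyRange
  split_ifs <;> first | rfl | omega

theorem pyRange_negm_cons (m i : Int) (hm : 0 < m) (hi : 0 < i) :
    PySem.List.pyRange i 0 (-m) = i :: PySem.List.pyRange (i - m) 0 (-m) := by
  have hq : (i - 0 + m - 1) / m = (i - 1) / m + 1 := by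
    have h : i - 0 + m - 1 = (i - 1) + 1 * m := by ring
    rw [h, Int.add_mul_ediv_right _ _ (by omega : m ≠ 0)]
  have hqn : 0 ≤ (i - 1) / m := Int.ediv_nonneg (by omega) (by omega)
  by_cases hrest : 0 < i - m
  · have hq' : (i - m - 0 + m - 1) / m = (i - m - 1) / m + 1 := by
      have h : i - m - 0 + m - 1 = (i - m - 1) + 1 * m := by ring
      rw [h, Int.add_mul_ediv_right _ _ (by omega : m ≠ 0)]
    have hsplit : (i - 1) / m = (i - m - 1) / m + 1 := by
      have h : i - 1 = (i - m - 1) + 1 * m := by ring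
      rw [h, Int.add_mul_ediv_right _ _ (by omega : m ≠ 0)]
    have hqn' : 0 ≤ (i - m - 1) / m := Int.ediv_nonneg (by omega) (by omega)
    unfold PySem.List.pyRange
    split_ifs with h1 h2 h3 h4 h5 <;> try omega
    simp only [neg_neg]
    rw [hq, hq']
    have hcnt : ((i - 1) / m + 1).toNat = ((i - m - 1) / m + 1).toNat + 1 := by omega
    rw [hcnt, List.range_succ_eq_map, List.map_cons, List.map_map]
    refine List.cons_eq_cons.mpr ⟨by simp, ?_⟩
    · apply List.map_congr_left
      intro a _
      simp only [Function.comp]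
      push_cast
      ring
  · -- last full step: i ≤ m, so i - m ≤ 0 and the tail range is empty
    have hz : (i - 1) / m = 0 := Int.ediv_eq_zero_of_lt (by omega) (by omega)
    unfold PySem.List.pyRange
    split_ifs with h1 h2 h3 h4 h5 <;> try omega
    all_goals simp only [neg_neg]
    all_goals rw [hq, hz]
    all_goals norm_num

theorem slice_full_length (s : List Int) (a m : Int) (hm : 0 < m) (ha : 0 ≤ a)
    (h : a + m ≤ (s.length : Int)) :
    (((PySem.List.slice s (some a) (some (a + m))).length : Int)) = m := by
  rw [PySem.List.length_slice]
  unfold PySem.List.clampIdx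
  split_ifs <;> push_cast <;> omega

-- head of a box of the sorted list: min of s[a : a+m] is s[a]
theorem min_slice_sorted (s : List Int) (hp : s.Pairwise (· ≤ ·)) (a b : Int)
    (ha : 0 ≤ a) (hab : a < b) (hb : b ≤ (s.length : Int)) :
    (PySem.List.min? (PySem.List.slice s (some a) (some b)) (fun y => y)).getD 0
      = PySem.List.pyGetD s a 0 := by
  rw [PySem.List.slice_of_nonneg s ha (by omega) (by omega) hb]
  have hlt : a.toNat < s.length := by omega
  have hne : (List.take (b.toNat - a.toNat) (List.drop a.toNat s)) ≠ [] := by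
    simp
    omega
  have hp' : (List.take (b.toNat - a.toNat) (List.drop a.toNat s)).Pairwise (· ≤ ·) :=
    List.Pairwise.sublist ((List.take_sublist _ _).trans (List.drop_sublist _ _)) hp
  rw [min?_of_pairwise _ hne hp']
  have hhd : (List.take (b.toNat - a.toNat) (List.drop a.toNat s)).head? = some s[a.toNat] := by
    rw [List.head?_eq_getElem?, List.getElem?_take_of_lt (by omega), List.getElem?_drop]
    simp [List.getElem?_eq_getElem hlt]
  rw [hhd]
  have ha' : a < (s.length : Int) := by omega
  simp [PySem.List.pyGetD, PySem.List.pyGet?, PySem.List.pyIdx?, ha, ha']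

-- A's loop, counted in full boxes: from i = m*c + r it adds the c box minima
theorem loopA (s : List Int) (m r : Int) (hm : 0 < m) (hr : 0 ≤ r) (hrm : r < m)
    (hp : s.Pairwise (· ≤ ·)) :
    ∀ (c : Nat) (acc : Int), m * c + r ≤ (s.length : Int) →
      solutionLoop s m (PySem.List.pyRange (m * c + r) 0 (-m)) acc
        = acc + m * gsum s m r c := by
  intro c
  induction c with
  | zero =>
    intro acc hlen
    simp only [Nat.cast_zero, mul_zero, zero_add] at hlen ⊢
    by_cases hr0 : 0 < r
    · rw [pyRange_negm_cons m r hm hr0]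
      simp only [solutionLoop]
      have hlen2 : ((PySem.List.slice s (some (r - m)) (some r)).length : Int) < m := by
        rw [PySem.List.length_slice]
        have h1 : PySem.List.clampIdx s.length r ≤ r.toNat := by
          unfold PySem.List.clampIdx
          rw [if_neg (by omega)]
          exact Nat.min_le_left _ _
        have h2 := Nat.sub_le (PySem.List.clampIdx s.length r) (PySem.List.clampIdx s.length (r - m))
        omega
      rw [if_pos hlen2]
      simp [gsum]
    · rw [pyRange_negm_nil m r hm (by omega)]
      simp [solutionLoop, gsum]
  | succ c ih =>
    intro acc hlen
    have hc0 : (0 : Int) ≤ m * (c : Int) := mul_nonneg (by omega) (by positivity)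
    have hi : (0 : Int) < m * ((c + 1 : Nat) : Int) + r := by
      have h : m * ((c + 1 : Nat) : Int) = m * (c : Int) + m := by push_cast; ring
      omega
    rw [pyRange_negm_cons m _ hm hi]
    simp only [solutionLoop]
    have harg : m * ((c + 1 : Nat) : Int) + r - m = m * (c : Int) + r := by push_cast; ring
    have harg2 : m * ((c + 1 : Nat) : Int) + r = (m * (c : Int) + r) + m := by push_cast; ring
    rw [harg2] at hlen
    rw [harg, harg2]
    have hfull := slice_full_length s (m * (c : Int) + r) m hm (by omega) hlen
    have hnlt : ¬ (((PySem.List.slice s (some (m * (c : Int) + r))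
        (some ((m * (c : Int) + r) + m))).length : Int) < m) := by rw [hfull]; omega
    rw [if_neg hnlt]
    have hmin := min_slice_sorted s hp (m * (c : Int) + r) ((m * (c : Int) + r) + m)
      (by omega) (by omega) hlen
    rw [hmin, ih _ (by omega)]
    simp [gsum]
    ring

-- ---- B-side lemmas ----

theorem mem_blocks (cnt : Int → Nat) (K : List Int) (x : Int) (hx : x ∈ blocks cnt K) :
    x ∈ K := by
  induction K with
  | nil => cases hx
  | cons g K ih =>
    rcases List.mem_append.mp hx with h | h
    · simp [List.eq_of_mem_replicate h]
    · exact List.mem_cons_of_mem _ (ih h)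

theorem blocks_pairwise (cnt : Int → Nat) (K : List Int)
    (hK : K.Pairwise (fun a b => b ≤ a)) :
    (blocks cnt K).Pairwise (fun a b : Int => b ≤ a) := by
  induction K with
  | nil => exact List.Pairwise.nil
  | cons g K ih =>
    rcases List.pairwise_cons.mp hK with ⟨hg, htail⟩
    refine List.pairwise_append.mpr ⟨?_, ih htail, ?_⟩
    · exact List.pairwise_replicate.mpr (Or.inr le_rfl)
    · intro a ha b hb
      rw [List.eq_of_mem_replicate ha]
      exact hg b (mem_blocks cnt K b hb)

theorem count_blocks (cnt : Int → Nat) (K : List Int) (hnd : K.Nodup) (x : Int) :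
    (blocks cnt K).count x = if x ∈ K then cnt x else 0 := by
  induction K with
  | nil => simp [blocks]
  | cons g K ih =>
    rcases List.nodup_cons.mp hnd with ⟨hg, hnd'⟩
    rw [blocks, List.count_append, List.count_replicate, ih hnd']
    by_cases hxg : x = g
    · subst hxg
      simp [hg]
    · simp [hxg, Ne.symm hxg]

-- boundary telescoping: if all boundary elements j*M-1 for t1 < j ≤ t2 are g,
-- the partial sums differ by (t2-t1)*g
theorem hsum_congr (D : List Int) (M : Nat) (g : Int) :
    ∀ (t2 t1 : Nat), t1 ≤ t2 →
      (∀ j : Nat, t1 < j → j ≤ t2 →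
        PySem.List.pyGetD D ((j : Int) * (M : Int) - 1) 0 = g) →
      hsum D M t2 = hsum D M t1 + ((t2 - t1 : Nat) : Int) * g := by
  intro t2
  induction t2 with
  | zero => intro t1 h1 _; interval_cases t1; simp
  | succ t2 ih =>
    intro t1 h1 hall
    by_cases he : t1 = t2 + 1
    · subst he; simp
    · have h2 : t1 ≤ t2 := by omega
      rw [hsum, ih t1 h2 (fun j hj1 hj2 => hall j hj1 (by omega))]
      have hl := hall (t2 + 1) (by omega) le_rfl
      rw [show (((t2 + 1 : Nat)) : Int) = (t2 : Int) + 1 by push_cast; ring] at hl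
      rw [hl]
      have : ((t2 + 1 - t1 : Nat) : Int) = ((t2 - t1 : Nat) : Int) + 1 := by omega
      rw [this]
      ring

-- B's fold over the descending distinct values, with D the concatenation of the runs
theorem foldB (m : Int) (M : Nat) (hm : m = (M : Int)) (hM : 0 < M)
    (D : List Int) (cnt : Int → Nat) :
    ∀ (K : List Int) (c : Nat) (a : Int), c ≤ D.length →
      D.drop c = blocks cnt K →
      K.foldl (fun (p : Int × Int) g =>
          (p.1 + (PySem.Int.floordiv (p.2 + ((cnt g : Nat) : Int)) m
                   - PySem.Int.floordiv p.2 m) * g * m, p.2 + ((cnt g : Nat) : Int)))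
        (a, (c : Int))
      = (a + m * (hsum D M (D.length / M) - hsum D M (c / M)), (D.length : Int)) := by
  intro K
  induction K with
  | nil =>
    intro c a hc hdrop
    have hcl : c = D.length := by
      have := congrArg List.length hdrop
      simp [blocks] at this
      omega
    subst hcl
    simp
  | cons g K ih =>
    intro c a hc hdrop
    have hlen : D.length - c = cnt g + (blocks cnt K).length := by
      have := congrArg List.length hdrop
      simpa [blocks] using this
    have hc2 : c + cnt g ≤ D.length := by omega
    have hdrop2 : D.drop (c + cnt g) = blocks cnt K := by
      rw [← List.drop_drop, hdrop, blocks, List.drop_left' (by simp)]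
    -- every element of D at a position in [c, c + cnt g) is g
    have hval : ∀ p : Nat, c ≤ p → p < c + cnt g →
        PySem.List.pyGetD D (p : Int) 0 = g := by
      intro p hp1 hp2
      have hplen : p < D.length := by omega
      rw [PySem.List.pyGetD_ofNat D p 0 hplen]
      have h0 : D[p]? = some g := by
        rw [show p = c + (p - c) by omega, ← List.getElem?_drop, hdrop, blocks,
          List.getElem?_append_left (by simp; omega), List.getElem?_replicate]
        rw [if_pos (by omega)]
      rw [List.getElem?_eq_getElem hplen] at h0
      exact Option.some.inj h0
    -- boundary count inside this run
    have hdivle : c / M ≤ (c + cnt g) / M := Nat.div_le_div_right (by omega)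
    have hstep : hsum D M ((c + cnt g) / M) = hsum D M (c / M)
        + (((c + cnt g) / M - c / M : Nat) : Int) * g := by
      apply hsum_congr D M g _ _ hdivle
      intro j hj1 hj2
      have hjm1 : c + 1 ≤ j * M := by
        have hb := Nat.div_add_mod c M
        have hmod := Nat.mod_lt c hM
        have h1 : (c / M + 1) * M ≤ j * M := Nat.mul_le_mul_right M (by omega)
        have h1' : (c / M + 1) * M = M * (c / M) + M := by ring
        omega
      have hjm2 : j * M ≤ c + cnt g := by
        calc j * M ≤ ((c + cnt g) / M) * M := Nat.mul_le_mul_right M hj2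
          _ ≤ c + cnt g := Nat.div_mul_le_self _ _
      have hcast : (j : Int) * (M : Int) - 1 = ((j * M - 1 : Nat) : Int) := by
        omega
      rw [hcast]
      exact hval (j * M - 1) (by omega) (by omega)
    rw [List.foldl_cons]
    have hfd1 : PySem.Int.floordiv ((c : Int) + ((cnt g : Nat) : Int)) m
        = (((c + cnt g) / M : Nat) : Int) := by
      rw [hm, show (c : Int) + ((cnt g : Nat) : Int) = (((c + cnt g : Nat)) : Int) by push_cast; ring]
      exact PySem.Int.floordiv_natCast _ _
    have hfd2 : PySem.Int.floordiv (c : Int) m = ((c / M : Nat) : Int) := by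
      rw [hm]; exact PySem.Int.floordiv_natCast _ _
    have hccast : (c : Int) + ((cnt g : Nat) : Int) = ((c + cnt g : Nat) : Int) := by push_cast; ring
    rw [hfd1, hfd2, hccast, ih (c + cnt g) _ hc2 hdrop2]
    refine Prod.ext ?_ rfl
    simp only
    rw [hstep]
    have hd : (((c + cnt g) / M - c / M : Nat) : Int)
        = (((c + cnt g) / M : Nat) : Int) - ((c / M : Nat) : Int) := by omega
    rw [hd]
    ring

-- the runs of the descending distinct values ARE the ascending sorted list reversed
theorem blocks_eq_rev (score : List Int) :
    blocks (fun g => score.count g)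
        (PySem.List.sorted (PySem.Set.ofList score) (fun y => y) true)
      = (PySem.List.sorted score (fun y => y) false).reverse := by
  have hKperm : (PySem.List.sorted (PySem.Set.ofList score) (fun y => y) true).Perm
      (PySem.Set.ofList score) := PySem.List.sorted_perm _ _ _
  have hKnd : (PySem.List.sorted (PySem.Set.ofList score) (fun y => y) true).Nodup :=
    hKperm.nodup_iff.mpr (PySem.Set.nodup_ofList score)
  apply List.Perm.eq_of_pairwise (le := fun a b : Int => b ≤ a)
    (fun a b _ _ h1 h2 => le_antisymm h2 h1)
    (blocks_pairwise _ _ (PySem.List.sorted_pairwise_rev _ _))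
    (List.pairwise_reverse.mpr (by simpa using PySem.List.sorted_pairwise score (fun y => y)))
  · -- a permutation: same count of every value
    apply List.perm_iff_count.mpr
    intro x
    rw [count_blocks _ _ hKnd x, List.count_reverse,
      (PySem.List.sorted_perm score (fun y => y) false).count_eq]
    by_cases hx : x ∈ score
    · rw [if_pos ((hKperm.mem_iff).mpr ((PySem.Set.mem_ofList score x).mpr hx))]
    · rw [if_neg (fun hc => hx ((PySem.Set.mem_ofList score x).mp ((hKperm.mem_iff).mp hc))),
        List.count_eq_zero_of_not_mem hx]

-- the boundary elements of the reversed (descending) list are the top box minima of the ascending one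
theorem hsum_rev (s : List Int) (M : Nat) (hM : 0 < M) (m : Int) (hm : m = (M : Int))
    (q R : Nat) (hn : s.length = M * q + R) :
    ∀ t, t ≤ q →
      hsum s.reverse M t = gsum s m (R : Int) q - gsum s m (R : Int) (q - t) := by
  intro t
  induction t with
  | zero => intro _; simp [hsum]
  | succ t ih =>
    intro ht
    set j := q - (t + 1) with hj
    have hjq : t + 1 + j = q := by omega
    have hsplit : M * q = M * j + M * (t + 1) := by rw [← Nat.mul_add]; congr 1; omega
    have hcomm : (t + 1) * M = M * (t + 1) := Nat.mul_comm _ _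
    have hpos : 0 < (t + 1) * M := Nat.mul_pos (by omega) hM
    have hbound : (t + 1) * M - 1 < s.reverse.length := by
      rw [List.length_reverse, hn]; omega
    have hidx : ((t : Int) + 1) * (M : Int) - 1 = (((t + 1) * M - 1 : Nat) : Int) := by
      rw [Nat.cast_sub (by omega : 1 ≤ (t + 1) * M)]; push_cast; ring
    have hrev : s.reverse[(t + 1) * M - 1]'hbound
        = s[M * j + R]'(by rw [hn]; omega) := by
      rw [List.getElem_reverse]
      congr 1
      rw [hn]
      omega
    have hq_t : q - t = j + 1 := by omega
    rw [hsum, hidx, PySem.List.pyGetD_ofNat _ _ _ hbound, hrev, ih (by omega), hq_t, gsum]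
    have hgidx : m * ((j : Nat) : Int) + (R : Int) = ((M * j + R : Nat) : Int) := by
      rw [hm]; push_cast; ring
    rw [hgidx, PySem.List.pyGetD_ofNat _ _ _ (by rw [hn]; omega)]
    ring

theorem solution_eq_alt (k : Int) (m : Int) (score : List Int) (hm : m ≠ 0) :
    solution k m score = solution_alt k m score := by
  unfold solution solution_alt
  by_cases hneg : m < 0
  · -- negative m: A's range is empty, B's first guard fires, both give 0
    have hn : ¬ ((score.length : Int) < m) := by
      have := Int.natCast_nonneg score.length; omega
    rw [if_neg hn, if_pos (Or.inl hneg)]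
    have hA : PySem.List.pyRange (score.length : Int) 0 (-m) = [] := by
      unfold PySem.List.pyRange
      split_ifs <;> first | rfl | omega
    rw [hA]
    simp [solutionLoop]
  · have hmpos : 0 < m := by omega
    have hmM : m = (m.toNat : Int) := by omega
    set M := m.toNat with hMdef
    have hMpos : 0 < M := by omega
    have hfd : PySem.Int.floordiv (score.length : Int) m
        = ((score.length / M : Nat) : Int) := by
      rw [hmM]; exact PySem.Int.floordiv_natCast _ _
    by_cases hq0 : score.length / M = 0
    · -- fewer elements than one box: both return 0
      have hlt : (score.length : Int) < m := by
        have := (Nat.div_eq_zero_iff_lt hMpos).mp hq0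
        omega
      rw [if_pos hlt, if_pos (Or.inr (by rw [hfd, hq0]; rfl))]
    · -- at least one full box
      have hge : ¬ ((score.length : Int) < m) := by
        have : M ≤ score.length := by
          by_contra hcon
          exact hq0 (Nat.div_eq_of_lt (by omega))
        omega
      rw [if_neg hge, if_neg (by
        rw [hfd]
        rintro (h | h)
        · exact hneg h
        · exact hq0 (by exact_mod_cast h))]
      set s := PySem.List.sorted score (fun y => y) false with hs
      have hslen : s.length = score.length := PySem.List.length_sorted _ _ _
      have hp : s.Pairwise (· ≤ ·) := by
        simpa using PySem.List.sorted_pairwise score (fun y => y)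
      set q := score.length / M with hqdef
      set R := score.length % M with hRdef
      have hdm : M * q + R = score.length := Nat.div_add_mod _ _
      -- A's side: the loop sums the q box minima of s
      have hA : solutionLoop s m (PySem.List.pyRange (score.length : Int) 0 (-m)) 0
          = m * gsum s m (R : Int) q := by
        have harg : ((score.length : Nat) : Int) = m * (q : Int) + (R : Int) := by
          rw [hmM]; exact_mod_cast hdm.symm
        rw [harg, loopA s m (R : Int) hmpos (by positivity)
          (by rw [hmM]; exact_mod_cast Nat.mod_lt _ hMpos) hp q 0
          (by rw [← harg]; exact_mod_cast Nat.le_of_eq hslen.symm)]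
        ring
      rw [hA]
      -- B's side: counter + descending walk
      simp only [PySem.Dict.foldl_insert_getD_add_one_eq_counter, PySem.Dict.keys_counter,
        PySem.Dict.getD_counter]
      have hB := foldB m M hmM hMpos
        (blocks (fun g => score.count g)
          (PySem.List.sorted (PySem.Set.ofList score) (fun y => y) true))
        (fun g => score.count g)
        (PySem.List.sorted (PySem.Set.ofList score) (fun y => y) true) 0 0 (by omega)
        List.drop_zero
      norm_num at hB
      rw [hB, blocks_eq_rev score, ← hs, List.length_reverse, hslen]
      rw [hsum_rev s M hMpos m hmM q R (by rw [hslen]; exact hdm.symm) q le_rfl]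
      simp [hsum, gsum]

-- ===== VERDICT (by name: the statement is the Claim_ definition above) =====
theorem solution_spec : Claim_equal_solution := by
  intro k m score _ hpre
  unfold Spec_solution
  exact solution_eq_alt k m score hpre
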